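-- pv_equiv track=rewrite | github.com/MasahiroNatsume/Setwise | backend/modules/generator.py | _recent_tail_lines
-- ===== SOURCE A (Python) =====
-- from typing import Any, Callable, Dict, List
--
-- def _recent_tail_lines(prior_context: str, limit: int = 3) -> List[str]:
--     lines: List[str] = []
--     for raw in (prior_context or "").splitlines():
--         value = raw.strip()
--         if not value:
--             continue
--         if ":" in value:
--             value = value.split(":", 1)[1].strip()
--         if value:
--             lines.append(value)
--     return lines[-max(1, limit) :]
-- ===== SOURCE B (Python) =====
-- from typing import List
--
-- def _recent_tail_lines(prior_context: str, limit: int = 3) -> List[str]: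
--     need = max(1, limit)
--     buf: List[str] = []
--     for raw in reversed((prior_context or "").splitlines()):
--         value = raw.strip()
--         if not value:
--             continue
--         if ":" in value:
--             value = value.split(":", 1)[1].strip()
--         if not value:
--             continue
--         buf.append(value)
--         if len(buf) == need:
--             break
--     buf.reverse()
--     return buf
-- ===== Notes on version B (the rewrite author's own statement) =====
-- stated objective: alternative
-- what changed: B scans the lines in reverse with an early break once max(1,limit) cleaned lines are collected and reverses the buffer, instead of A's full forward pass that collects every cleaned line and takes a final negative slice.
import Mathlib
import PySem

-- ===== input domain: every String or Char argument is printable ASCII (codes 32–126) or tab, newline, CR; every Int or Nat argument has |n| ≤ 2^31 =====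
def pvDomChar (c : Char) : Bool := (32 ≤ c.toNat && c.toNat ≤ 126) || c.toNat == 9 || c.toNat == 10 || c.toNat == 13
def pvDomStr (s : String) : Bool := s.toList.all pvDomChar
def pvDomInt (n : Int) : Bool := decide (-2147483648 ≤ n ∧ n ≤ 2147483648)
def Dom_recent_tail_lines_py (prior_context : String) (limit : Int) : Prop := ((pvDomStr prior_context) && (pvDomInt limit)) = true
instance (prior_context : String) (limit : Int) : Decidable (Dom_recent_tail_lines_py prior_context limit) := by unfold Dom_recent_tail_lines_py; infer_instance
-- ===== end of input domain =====

-- B replaces A's full forward pass plus a final negative slice by a single reverse scan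
-- that stops as soon as max(1,limit) cleaned lines are collected (objective: alternative,
-- early exit; same worst-case cost).

-- ===== PORT A =====
def recent_tail_lines_py (prior_context : String) (limit : Int) : List String :=
  let lines := (PySem.Str.splitlines prior_context).foldl (fun lines raw =>
    let value := PySem.Str.strip raw
    if value = "" then lines
    else
      let value := if PySem.Str.isIn ":" value then
          PySem.Str.strip (PySem.List.pyGetD ((PySem.Str.splitMax? value ":" 1).getD []) 1 "")
        else value
      if value = "" then lines else lines ++ [value]) []
  PySem.List.slice lines (some (-(max 1 limit))) none

-- ===== PORT B =====
-- the reverse loop of Source B: scan `rest`, appending each cleaned non-empty line to `buf`,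
-- and break as soon as `buf` holds `need` lines
def pvAltLoop (need : Int) : List String → List String → List String
  | [], buf => buf
  | raw :: rest, buf =>
    let value := PySem.Str.strip raw
    if value = "" then pvAltLoop need rest buf
    else
      let value := if PySem.Str.isIn ":" value then
          PySem.Str.strip (PySem.List.pyGetD ((PySem.Str.splitMax? value ":" 1).getD []) 1 "")
        else value
      if value = "" then pvAltLoop need rest buf
      else
        let buf' := buf ++ [value]
        if (buf'.length : Int) = need then buf' else pvAltLoop need rest buf'

def recent_tail_lines_py_alt (prior_context : String) (limit : Int) : List String :=
  (pvAltLoop (max 1 limit) (PySem.Str.splitlines prior_context).reverse []).reverse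

-- ===== PRECONDITION & SPEC =====
def Spec_recent_tail_lines_py (prior_context : String) (limit : Int) (out : List String) : Prop := out = recent_tail_lines_py_alt prior_context limit
instance (prior_context : String) (limit : Int) (out : List String) : Decidable (Spec_recent_tail_lines_py prior_context limit out) := by unfold Spec_recent_tail_lines_py; infer_instance

-- ===== CLAIM (what is proved, stated in full; the proofs are below) =====
def Claim_equal_recent_tail_lines_py : Prop := ∀ (prior_context : String) (limit : Int), Dom_recent_tail_lines_py prior_context limit → Spec_recent_tail_lines_py prior_context limit (recent_tail_lines_py prior_context limit)

-- ===== LEMMAS AND PROOFS =====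

-- the per-line cleaning both programs perform, as an Option
def pvClean (raw : String) : Option String :=
  let value := PySem.Str.strip raw
  if value = "" then none
  else
    let value := if PySem.Str.isIn ":" value then
        PySem.Str.strip (PySem.List.pyGetD ((PySem.Str.splitMax? value ":" 1).getD []) 1 "")
      else value
    if value = "" then none else some value

lemma foldlA_eq (ls : List String) (acc : List String) :
    ls.foldl (fun lines raw =>
      let value := PySem.Str.strip raw
      if value = "" then lines
      else
        let value := if PySem.Str.isIn ":" value then
            PySem.Str.strip (PySem.List.pyGetD ((PySem.Str.splitMax? value ":" 1).getD []) 1 "")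
          else value
        if value = "" then lines else lines ++ [value]) acc
    = acc ++ ls.filterMap pvClean := by
  induction ls generalizing acc with
  | nil => simp
  | cons raw rest ih =>
    simp only [List.foldl_cons, List.filterMap_cons, ih]
    unfold pvClean
    split_ifs <;> simp_all

lemma pvAltLoop_cons (need : Int) (raw : String) (rest buf : List String) :
    pvAltLoop need (raw :: rest) buf =
      (pvClean raw).elim (pvAltLoop need rest buf)
        (fun v => if ((buf ++ [v]).length : Int) = need then buf ++ [v]
                  else pvAltLoop need rest (buf ++ [v])) := by
  by_cases h1 : PySem.Str.strip raw = ""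
  · have hc : pvClean raw = none := by simp [pvClean, h1]
    rw [pvAltLoop, hc]; simp [h1]
  · by_cases h2 : PySem.Chars.isIn [':'] (PySem.Chars.strip raw.toList) = true
    · by_cases h3 : PySem.Str.strip (PySem.List.pyGetD ((PySem.Str.splitMax? (PySem.Str.strip raw) ":" 1).getD []) 1 "") = ""
      · have hc : pvClean raw = none := by simp [pvClean, h1, h2, h3]
        rw [pvAltLoop, hc]; simp [h1, h2, h3]
      · have hc : pvClean raw = some (PySem.Str.strip (PySem.List.pyGetD ((PySem.Str.splitMax? (PySem.Str.strip raw) ":" 1).getD []) 1 "")) := by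
          simp [pvClean, h1, h2, h3]
        rw [pvAltLoop, hc]; simp [h1, h2, h3]
    · have hc : pvClean raw = some (PySem.Str.strip raw) := by simp [pvClean, h1, h2]
      rw [pvAltLoop, hc]; simp [h1, h2]

lemma pvAltLoop_eq (need : Int) (rs : List String) : ∀ buf, (buf.length : Int) < need →
    pvAltLoop need rs buf = buf ++ (rs.filterMap pvClean).take (need.toNat - buf.length) := by
  induction rs with
  | nil => intro buf h; simp [pvAltLoop]
  | cons raw rest ih =>
    intro buf h
    rw [pvAltLoop_cons]
    rcases hcl : pvClean raw with _ | v
    · simp only [List.filterMap_cons, hcl, Option.elim]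
      exact ih buf h
    · simp only [List.filterMap_cons, hcl, Option.elim]
      by_cases hb : (((buf ++ [v]).length : Nat) : Int) = need
      · rw [if_pos hb]
        have h1 : need.toNat - buf.length = 1 := by
          simp [List.length_append] at hb; omega
        simp [h1]
      · rw [if_neg hb]
        have hlt : (((buf ++ [v]).length : Nat) : Int) < need := by
          simp [List.length_append] at hb ⊢; omega
        rw [ih (buf ++ [v]) hlt]
        have h2 : need.toNat - buf.length = (need.toNat - (buf ++ [v]).length) + 1 := by
          simp [List.length_append] at hb hlt ⊢; omega
        simp [h2, List.take_succ_cons]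

-- ===== VERDICT (by name: the statement is the Claim_ definition above) =====
theorem recent_tail_lines_py_spec : Claim_equal_recent_tail_lines_py := by
  intro pc limit _
  unfold Spec_recent_tail_lines_py recent_tail_lines_py recent_tail_lines_py_alt
  have hk : 0 < (max 1 limit).toNat := by omega
  have hneg : -(max 1 limit) = -(((max 1 limit).toNat : Nat) : Int) := by omega
  rw [foldlA_eq, hneg, PySem.List.slice_from_neg_natCast _ _ hk]
  rw [pvAltLoop_eq _ _ _ (by simp)]
  simp [List.filterMap_reverse, List.take_reverse]
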